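-- pv_equiv track=rewrite | github.com/sm2774us/competitive_programming | Graph/018_leetcode_P_990_SatisfiabilityOfEqualityEquations_Application_Of_Kosaraju_Algorithm/Solution.py | equationsPossibleUsingBFS
-- ===== SOURCE A (Python) =====
-- from typing import List
-- import collections
--
-- def equationsPossibleUsingBFS(equations: List[str]) -> bool:
--     graph = collections.defaultdict(set)
--     check = []
--     '''
--     def dfs(u, target, visited):
--         if u == target: return True
--         visited.add(u)
--         for v in graph[u]:
--             if v in visited: continue
--             return dfs(v, target, visited):
--     '''
--     def bfs(u, target):
--         Q = collections.deque([u])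
--         visited = set([u])
--         while Q:
--             u = Q.popleft()
--             if u == target: return True
--             for v in graph[u]:
--                 if v not in visited:
--                     visited.add(v)
--                     Q.append(v)
--         return False
--
--     for eq in equations:
--         if eq[1:3] == '!=':
--             a, b = eq.split('!=')
--             check.append((a, b))
--             continue
--         u, v = eq.split('==')
--         graph[u].add(v)
--         graph[v].add(u)
--
--     for u, v in check:
--         if bfs(u, v):
--             return False
--     return True
-- ===== SOURCE B (Python) =====
-- from typing import List
--
-- def equationsPossibleUsingBFS(equations: List[str]) -> bool:
--     # union of disjoint components instead of graph + BFS
--     comps = []  # disjoint sets of variables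
--     check = []
--     for eq in equations:
--         if eq[1:3] == '!=':
--             a, b = eq.split('!=')
--             check.append((a, b))
--         else:
--             u, v = eq.split('==')
--             cu = {u}
--             cv = {v}
--             rest = []
--             for c in comps:
--                 if u in c:
--                     cu = c
--                 elif v in c:
--                     cv = c
--                 else:
--                     rest.append(c)
--             comps = rest + [cu | cv]
--
--     def same(a, b):
--         return a == b or any(a in c and b in c for c in comps)
--
--     return not any(same(a, b) for a, b in check)
-- ===== Notes on version B (the rewrite author's own statement) =====
-- stated objective: alternative
-- what changed: Replaced the adjacency-graph plus per-inequality BFS with incremental merging of disjoint variable components: each '==' merges the (at most) two components containing its sides, and each '!=' pair is then checked by same-component membership instead of a graph search.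
import Mathlib
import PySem

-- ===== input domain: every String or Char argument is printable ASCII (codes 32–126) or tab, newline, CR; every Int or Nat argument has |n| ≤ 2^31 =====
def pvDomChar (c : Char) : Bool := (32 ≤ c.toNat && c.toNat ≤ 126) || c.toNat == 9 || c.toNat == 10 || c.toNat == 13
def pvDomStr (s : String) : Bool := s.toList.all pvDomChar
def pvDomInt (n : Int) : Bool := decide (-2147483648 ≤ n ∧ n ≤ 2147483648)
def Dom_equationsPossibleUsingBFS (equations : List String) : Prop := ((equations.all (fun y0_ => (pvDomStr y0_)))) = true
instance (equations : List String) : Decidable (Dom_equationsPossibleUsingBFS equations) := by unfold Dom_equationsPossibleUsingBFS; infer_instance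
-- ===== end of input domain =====

-- B replaces A's adjacency graph + per-inequality BFS by incremental merging of disjoint
-- variable components ('alternative' objective); return values agree on every input where A
-- does not raise (Pre_ excludes the equations whose split-unpacking raises ValueError).

-- ===== PORT A =====
-- graph[u].add(v); graph[v].add(u)  (defaultdict(set))
def pvGraphAdd (g : PySem.Dict String (PySem.Set String)) (u v : String) :
    PySem.Dict String (PySem.Set String) :=
  g.insert u (PySem.Set.add (g.getD u PySem.Set.empty) v)

-- loop body of A's first 'for eq in equations' (on a bad unpack Python raises; outside Pre_)
def pvStepA (st : PySem.Dict String (PySem.Set String) × List (String × String)) (eq : String) :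
    PySem.Dict String (PySem.Set String) × List (String × String) :=
  if PySem.Str.slice eq (some 1) (some 3) == "!=" then
    match PySem.Str.split? eq "!=" with
    | some [a, b] => (st.1, st.2 ++ [(a, b)])
    | _ => st
  else
    match PySem.Str.split? eq "==" with
    | some [u, v] => (pvGraphAdd (pvGraphAdd st.1 u v) v u, st.2)
    | _ => st

-- 'for v in graph[u]: if v not in visited: visited.add(v); Q.append(v)'
def pvBfsInner (visited : PySem.Set String) (Q : List String) :
    List String → PySem.Set String × List String
  | [] => (visited, Q)
  | v :: ns =>
    if PySem.Set.contains visited v then pvBfsInner visited Q ns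
    else pvBfsInner (PySem.Set.add visited v) (Q ++ [v]) ns

-- all vertices occurring as neighbours, for the termination measure only
def pvVerts (g : PySem.Dict String (PySem.Set String)) : List String :=
  g.values.flatMap (fun c => c)

def pvUnvis (g : PySem.Dict String (PySem.Set String)) (vis : PySem.Set String) : Nat :=
  ((pvVerts g).filter (fun x => !(PySem.Set.contains vis x))).length

lemma pvMem_verts (g : PySem.Dict String (PySem.Set String)) (u x : String)
    (h : x ∈ g.getD u PySem.Set.empty) : x ∈ pvVerts g := by
  rw [PySem.Dict.getD_eq_get?_getD] at h
  cases hg : g.get? u with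
  | none => rw [hg] at h; simp [PySem.Set.empty] at h
  | some s =>
    rw [hg] at h
    simp only [Option.getD_some] at h
    have hsv : s ∈ g.values := by
      have hm := PySem.Dict.mem_items_of_get?_eq_some g hg
      simp [PySem.Dict.values]
      exact ⟨u, hm⟩
    exact List.mem_flatMap.mpr ⟨s, hsv, h⟩

lemma pvUnvis_add (g : PySem.Dict String (PySem.Set String)) (vis : PySem.Set String)
    (v : String) (hv : v ∈ pvVerts g) (hnv : PySem.Set.contains vis v = false) :
    pvUnvis g (PySem.Set.add vis v) + 1 ≤ pvUnvis g vis := by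
  unfold pvUnvis
  have hfe : ((pvVerts g).filter (fun x => !(PySem.Set.contains (PySem.Set.add vis v) x)))
      = ((pvVerts g).filter (fun x => !(PySem.Set.contains vis x))).filter (fun x => !(x == v)) := by
    rw [List.filter_filter]
    apply List.filter_congr
    intro x hx
    have : (PySem.Set.contains (PySem.Set.add vis v) x = true) ↔ (PySem.Set.contains vis x = true ∨ x = v) := by
      rw [PySem.Set.contains_iff, PySem.Set.mem_add, PySem.Set.contains_iff]
    cases hc : PySem.Set.contains (PySem.Set.add vis v) x <;>
    cases hc1 : PySem.Set.contains vis x <;>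
    cases hc2 : (x == v) <;> simp_all
  rw [hfe]
  have hv1 : v ∈ (pvVerts g).filter (fun x => !(PySem.Set.contains vis x)) := by
    rw [List.mem_filter]
    refine ⟨hv, by
      simp only [Bool.not_eq_true']
      exact hnv⟩
  have := List.length_filter_lt_length_iff_exists
    (l := (pvVerts g).filter (fun x => !(PySem.Set.contains vis x)))
    (p := fun x => !(x == v)) |>.mpr ⟨v, hv1, by simp⟩
  omega

lemma pvBfsInner_measure (g : PySem.Dict String (PySem.Set String)) (ns : List String) :
    ∀ vis Q, (∀ x ∈ ns, x ∈ pvVerts g) →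
    pvUnvis g (pvBfsInner vis Q ns).1 + (pvBfsInner vis Q ns).2.length ≤
      pvUnvis g vis + Q.length := by
  induction ns with
  | nil => intro vis Q _; simp [pvBfsInner]
  | cons v ns ih =>
    intro vis Q h
    rw [pvBfsInner]
    by_cases hc : PySem.Set.contains vis v = true
    · simp only [hc, if_true]
      exact ih vis Q (fun x hx => h x (List.mem_cons_of_mem _ hx))
    · simp only [Bool.not_eq_true] at hc
      simp only [hc, Bool.false_eq_true, if_false]
      have h1 := ih (PySem.Set.add vis v) (Q ++ [v]) (fun x hx => h x (List.mem_cons_of_mem _ hx))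
      have h2 := pvUnvis_add g vis v (h v (List.mem_cons_self)) hc
      simp only [List.length_append, List.length_cons, List.length_nil] at h1 ⊢
      omega

-- the 'while Q' loop of A's bfs
def pvBfsLoop (g : PySem.Dict String (PySem.Set String)) (target : String)
    (Q : List String) (visited : PySem.Set String) : Bool :=
  match Q with
  | [] => false
  | u :: Qt =>
    if u == target then true
    else
      let p := pvBfsInner visited Qt (g.getD u PySem.Set.empty)
      pvBfsLoop g target p.2 p.1
termination_by pvUnvis g visited + Q.length
decreasing_by
  have h := pvBfsInner_measure g (g.getD u PySem.Set.empty) visited Qt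
    (fun x hx => pvMem_verts g u x hx)
  simp only [List.length_cons]
  omega

-- A's bfs(u, target): Q = deque([u]), visited = set([u])
def pvBfs (g : PySem.Dict String (PySem.Set String)) (u target : String) : Bool :=
  pvBfsLoop g target [u] (PySem.Set.add PySem.Set.empty u)

-- 'for u, v in check: if bfs(u, v): return False / return True'
def pvCheckLoop (g : PySem.Dict String (PySem.Set String)) :
    List (String × String) → Bool
  | [] => true
  | (u, v) :: rest => if pvBfs g u v then false else pvCheckLoop g rest

def equationsPossibleUsingBFS (equations : List String) : Bool :=
  let st := equations.foldl pvStepA (PySem.Dict.empty, [])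
  pvCheckLoop st.1 st.2

-- ===== PORT B =====
-- inner 'for c in comps' loop: pick the component containing u, the one containing v, keep the rest
def pvMergeFold (u v : String) (comps : List (PySem.Set String)) :
    PySem.Set String × PySem.Set String × List (PySem.Set String) :=
  comps.foldl
    (fun acc c =>
      if PySem.Set.contains c u then (c, acc.2.1, acc.2.2)
      else if PySem.Set.contains c v then (acc.1, c, acc.2.2)
      else (acc.1, acc.2.1, acc.2.2 ++ [c]))
    (PySem.Set.add PySem.Set.empty u, PySem.Set.add PySem.Set.empty v, [])

-- loop body of B's 'for eq in equations'
def pvStepB (st : List (PySem.Set String) × List (String × String)) (eq : String) :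
    List (PySem.Set String) × List (String × String) :=
  if PySem.Str.slice eq (some 1) (some 3) == "!=" then
    match PySem.Str.split? eq "!=" with
    | some [a, b] => (st.1, st.2 ++ [(a, b)])
    | _ => st
  else
    match PySem.Str.split? eq "==" with
    | some [u, v] =>
      let m := pvMergeFold u v st.1
      (m.2.2 ++ [PySem.Set.union m.1 m.2.1], st.2)
    | _ => st

-- same(a, b)
def pvSame (comps : List (PySem.Set String)) (a b : String) : Bool :=
  a == b || comps.any (fun c => PySem.Set.contains c a && PySem.Set.contains c b)

def equationsPossibleUsingBFS_alt (equations : List String) : Bool :=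
  let st := equations.foldl pvStepB ([], [])
  !(st.2.any (fun p => pvSame st.1 p.1 p.2))

-- ===== PRECONDITION & SPEC =====
-- Pre_ excludes exactly the inputs on which A raises: an equation whose side-picked separator
-- ('!=' when eq[1:3] == '!=', else '==') does not split it into exactly two pieces makes
-- Python's tuple unpacking raise ValueError (B raises identically there).
def Pre_equationsPossibleUsingBFS (equations : List String) : Prop :=
  ∀ eq ∈ equations,
    ((PySem.Str.split? eq
        (if PySem.Str.slice eq (some 1) (some 3) = "!=" then "!=" else "==")).getD []).length = 2
instance (equations : List String) : Decidable (Pre_equationsPossibleUsingBFS equations) := by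
  unfold Pre_equationsPossibleUsingBFS; infer_instance

def pvWitness_equationsPossibleUsingBFS : List String := ["a==b", "b==c", "a!=c"]

def Spec_equationsPossibleUsingBFS (equations : List String) (out : Bool) : Prop :=
  out = equationsPossibleUsingBFS_alt equations
instance (equations : List String) (out : Bool) : Decidable (Spec_equationsPossibleUsingBFS equations out) := by unfold Spec_equationsPossibleUsingBFS; infer_instance

-- ===== CLAIM (what is proved, stated in full; the proofs are below) =====
def Claim_equal_equationsPossibleUsingBFS : Prop := ∀ (equations : List String), Dom_equationsPossibleUsingBFS equations → Pre_equationsPossibleUsingBFS equations → Spec_equationsPossibleUsingBFS equations (equationsPossibleUsingBFS equations)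

-- ===== LEMMAS AND PROOFS =====

-- adjacency relation of A's graph
def pvAdj (g : PySem.Dict String (PySem.Set String)) (a b : String) : Prop :=
  b ∈ g.getD a PySem.Set.empty

-- "same component" relation of B's comps
def pvSameC (comps : List (PySem.Set String)) (a b : String) : Prop :=
  a = b ∨ ∃ c ∈ comps, a ∈ c ∧ b ∈ c

-- pairwise disjointness of the component list
def pvDisj (comps : List (PySem.Set String)) : Prop :=
  comps.Pairwise (fun c d => ∀ x, x ∈ c → x ∉ d)

-- the invariant tying A's graph to B's components
def pvInv (g : PySem.Dict String (PySem.Set String)) (comps : List (PySem.Set String)) : Prop :=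
  pvDisj comps ∧ ∀ x y, pvSameC comps x y ↔ Relation.ReflTransGen (pvAdj g) x y

lemma pvRtg_congr {r r' : String → String → Prop} (h : ∀ a b, r a b ↔ r' a b) {x y : String}
    (hr : Relation.ReflTransGen r x y) : Relation.ReflTransGen r' x y :=
  Relation.ReflTransGen.mono (fun a b hab => (h a b).mp hab) hr

lemma pvRtg_empty {r : String → String → Prop} (h : ∀ a b, ¬ r a b) (x y : String) :
    Relation.ReflTransGen r x y ↔ x = y := by
  constructor
  · intro hr
    induction hr with
    | refl => rfl
    | tail _ hstep _ => exact absurd hstep (h _ _)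
  · rintro rfl; exact Relation.ReflTransGen.refl

lemma pvRtg_union_pair (r : String → String → Prop) (u v x y : String) :
    Relation.ReflTransGen (fun a b => r a b ∨ (a = u ∧ b = v) ∨ (a = v ∧ b = u)) x y ↔
      Relation.ReflTransGen r x y ∨
      (Relation.ReflTransGen r x u ∧ Relation.ReflTransGen r v y) ∨
      (Relation.ReflTransGen r x v ∧ Relation.ReflTransGen r u y) := by
  constructor
  · intro hr
    induction hr with
    | refl => exact Or.inl Relation.ReflTransGen.refl
    | tail _ hstep ih =>
      rename_i m w _
      rcases hstep with hs | ⟨rfl, rfl⟩ | ⟨rfl, rfl⟩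
      · rcases ih with h1 | ⟨h1, h2⟩ | ⟨h1, h2⟩
        · exact Or.inl (h1.tail hs)
        · exact Or.inr (Or.inl ⟨h1, h2.tail hs⟩)
        · exact Or.inr (Or.inr ⟨h1, h2.tail hs⟩)
      · rcases ih with h1 | ⟨h1, h2⟩ | ⟨h1, h2⟩
        · exact Or.inr (Or.inl ⟨h1, Relation.ReflTransGen.refl⟩)
        · exact Or.inr (Or.inl ⟨h1, Relation.ReflTransGen.refl⟩)
        · exact Or.inl h1
      · rcases ih with h1 | ⟨h1, h2⟩ | ⟨h1, h2⟩
        · exact Or.inr (Or.inr ⟨h1, Relation.ReflTransGen.refl⟩)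
        · exact Or.inl h1
        · exact Or.inr (Or.inr ⟨h1, Relation.ReflTransGen.refl⟩)
  · have mono : ∀ a b, Relation.ReflTransGen r a b →
        Relation.ReflTransGen (fun a b => r a b ∨ (a = u ∧ b = v) ∨ (a = v ∧ b = u)) a b :=
      fun a b hab => Relation.ReflTransGen.mono (fun _ _ h => Or.inl h) hab
    rintro (h1 | ⟨h1, h2⟩ | ⟨h1, h2⟩)
    · exact mono _ _ h1
    · exact ((mono _ _ h1).tail (Or.inr (Or.inl ⟨rfl, rfl⟩))).trans (mono _ _ h2)
    · exact ((mono _ _ h1).tail (Or.inr (Or.inr ⟨rfl, rfl⟩))).trans (mono _ _ h2)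

lemma pvAdj_after_add (g : PySem.Dict String (PySem.Set String)) (u v a b : String) :
    pvAdj (pvGraphAdd (pvGraphAdd g u v) v u) a b ↔
      pvAdj g a b ∨ (a = u ∧ b = v) ∨ (a = v ∧ b = u) := by
  unfold pvAdj pvGraphAdd
  by_cases hav : a = v
  · subst hav
    rw [PySem.Dict.getD_insert_self, PySem.Set.mem_add]
    by_cases hau : a = u
    · subst hau
      rw [PySem.Dict.getD_insert_self, PySem.Set.mem_add]
      tauto
    · rw [PySem.Dict.getD_insert, if_neg hau]
      tauto
  · rw [PySem.Dict.getD_insert, if_neg hav]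
    by_cases hau : a = u
    · subst hau
      rw [PySem.Dict.getD_insert_self, PySem.Set.mem_add]
      tauto
    · rw [PySem.Dict.getD_insert, if_neg hau]
      tauto

lemma pvSameC_symm {comps : List (PySem.Set String)} {a b : String}
    (h : pvSameC comps a b) : pvSameC comps b a := by
  rcases h with rfl | ⟨c, hc, h1, h2⟩
  · exact Or.inl rfl
  · exact Or.inr ⟨c, hc, h2, h1⟩

lemma pvDisj_unique {comps : List (PySem.Set String)} (hd : pvDisj comps)
    {c c' : PySem.Set String} {x : String} (hc : c ∈ comps) (hc' : c' ∈ comps)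
    (hx : x ∈ c) (hx' : x ∈ c') : c = c' := by
  induction comps with
  | nil => cases hc
  | cons d ds ih =>
    rw [pvDisj, List.pairwise_cons] at hd
    rcases List.mem_cons.mp hc with h1 | h1
    · rcases List.mem_cons.mp hc' with h2 | h2
      · rw [h1, h2]
      · subst h1
        exact absurd hx' (hd.1 c' h2 x hx)
    · rcases List.mem_cons.mp hc' with h2 | h2
      · subst h2
        exact absurd hx (hd.1 c h1 x hx')
      · exact ih hd.2 h1 h2

lemma pvSameC_trans {comps : List (PySem.Set String)} (hd : pvDisj comps) {a b c : String}
    (h1 : pvSameC comps a b) (h2 : pvSameC comps b c) : pvSameC comps a c := by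
  rcases h1 with rfl | ⟨c1, hc1, ha1, hb1⟩
  · exact h2
  · rcases h2 with rfl | ⟨c2, hc2, hb2, hc2'⟩
    · exact Or.inr ⟨c1, hc1, ha1, hb1⟩
    · have := pvDisj_unique hd hc1 hc2 hb1 hb2
      subst this
      exact Or.inr ⟨c1, hc1, ha1, hc2'⟩

lemma pvContains_true {c : PySem.Set String} {x : String} (h : x ∈ c) :
    PySem.Set.contains c x = true := by rw [PySem.Set.contains_iff]; exact h

lemma pvContains_false {c : PySem.Set String} {x : String} (h : x ∉ c) :
    PySem.Set.contains c x = false := by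
  cases hc : PySem.Set.contains c x
  · rfl
  · rw [PySem.Set.contains_iff] at hc; exact absurd hc h

lemma pvMem_of_contains {c : PySem.Set String} {x : String}
    (h : PySem.Set.contains c x = true) : x ∈ c := by rwa [PySem.Set.contains_iff] at h

def pvMStep (u v : String) (acc : PySem.Set String × PySem.Set String × List (PySem.Set String))
    (c : PySem.Set String) : PySem.Set String × PySem.Set String × List (PySem.Set String) :=
  if PySem.Set.contains c u then (c, acc.2.1, acc.2.2)
  else if PySem.Set.contains c v then (acc.1, c, acc.2.2)
  else (acc.1, acc.2.1, acc.2.2 ++ [c])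

lemma pvMergeFold_eq (u v : String) (comps : List (PySem.Set String)) :
    pvMergeFold u v comps =
      comps.foldl (pvMStep u v) (PySem.Set.add PySem.Set.empty u, PySem.Set.add PySem.Set.empty v, []) := rfl

lemma pvMergeFold_spec (u v : String) :
    ∀ (comps : List (PySem.Set String)) acc, pvDisj comps →
    (((∃ c ∈ comps, u ∈ c) →
        ∀ x, (x ∈ (comps.foldl (pvMStep u v) acc).1 ↔ ∃ c ∈ comps, u ∈ c ∧ x ∈ c)) ∧
     ((¬ ∃ c ∈ comps, u ∈ c) → (comps.foldl (pvMStep u v) acc).1 = acc.1) ∧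
     ((∃ c ∈ comps, v ∈ c ∧ u ∉ c) →
        ∀ x, (x ∈ (comps.foldl (pvMStep u v) acc).2.1 ↔ ∃ c ∈ comps, v ∈ c ∧ u ∉ c ∧ x ∈ c)) ∧
     ((¬ ∃ c ∈ comps, v ∈ c ∧ u ∉ c) → (comps.foldl (pvMStep u v) acc).2.1 = acc.2.1) ∧
     ((comps.foldl (pvMStep u v) acc).2.2 =
        acc.2.2 ++ comps.filter (fun c => !(PySem.Set.contains c u) && !(PySem.Set.contains c v)))) := by
  intro comps
  induction comps with
  | nil => intro acc _; refine ⟨?_, ?_, ?_, ?_, ?_⟩ <;> simp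
  | cons c cs ih =>
    intro acc hd
    rw [pvDisj, List.pairwise_cons] at hd
    have ihs := ih (pvMStep u v acc c) hd.2
    by_cases hcu : u ∈ c
    · have hb : PySem.Set.contains c u = true := pvContains_true hcu
      have hstep : pvMStep u v acc c = (c, acc.2.1, acc.2.2) := by
        unfold pvMStep; rw [hb]; rfl
      rw [hstep] at ihs
      have hnecs : ¬ ∃ c' ∈ cs, u ∈ c' := by
        rintro ⟨c', hc', hu'⟩
        exact hd.1 c' hc' u hcu hu'
      have hfold : List.foldl (pvMStep u v) acc (c :: cs) = List.foldl (pvMStep u v) (c, acc.2.1, acc.2.2) cs := by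
        rw [List.foldl_cons, hstep]
      refine ⟨?_, ?_, ?_, ?_, ?_⟩
      · intro _ x
        rw [hfold, ihs.2.1 hnecs]
        constructor
        · intro hx; exact ⟨c, List.mem_cons_self, hcu, hx⟩
        · rintro ⟨c'', hc'', hu'', hx''⟩
          rcases List.mem_cons.mp hc'' with h | h
          · rwa [← h]
          · exact absurd ⟨c'', h, hu''⟩ hnecs
      · intro hne; exact absurd ⟨c, List.mem_cons_self, hcu⟩ hne
      · rintro ⟨c', hc', hv', hu'⟩
        rcases List.mem_cons.mp hc' with h | h
        · rw [h] at hu'; exact absurd hcu hu'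
        · intro x
          rw [hfold, ihs.2.2.1 ⟨c', h, hv', hu'⟩ x]
          constructor
          · rintro ⟨c'', hc'', h1, h2, h3⟩; exact ⟨c'', List.mem_cons_of_mem _ hc'', h1, h2, h3⟩
          · rintro ⟨c'', hc'', h1, h2, h3⟩
            rcases List.mem_cons.mp hc'' with hh | hh
            · rw [hh] at h2; exact absurd hcu h2
            · exact ⟨c'', hh, h1, h2, h3⟩
      · intro hne
        rw [hfold, ihs.2.2.2.1 (fun ⟨c', hc', h1, h2⟩ => hne ⟨c', List.mem_cons_of_mem _ hc', h1, h2⟩)]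
      · rw [hfold, ihs.2.2.2.2]
        have : List.filter (fun c => !(PySem.Set.contains c u) && !(PySem.Set.contains c v)) (c :: cs)
            = List.filter (fun c => !(PySem.Set.contains c u) && !(PySem.Set.contains c v)) cs := by
          have hp : (!(PySem.Set.contains c u) && !(PySem.Set.contains c v)) = false := by
            rw [hb]; rfl
          rw [List.filter_cons, hp]; simp
        rw [this]
    · have hbu : PySem.Set.contains c u = false := pvContains_false hcu
      by_cases hcv : v ∈ c
      · have hbv : PySem.Set.contains c v = true := pvContains_true hcv
        have hstep : pvMStep u v acc c = (acc.1, c, acc.2.2) := by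
          unfold pvMStep; rw [hbu, hbv]; rfl
        rw [hstep] at ihs
        have hfold : List.foldl (pvMStep u v) acc (c :: cs) = List.foldl (pvMStep u v) (acc.1, c, acc.2.2) cs := by
          rw [List.foldl_cons, hstep]
        have hnecs : ¬ ∃ c' ∈ cs, v ∈ c' ∧ u ∉ c' := by
          rintro ⟨c', hc', hv', _⟩
          exact hd.1 c' hc' v hcv hv'
        refine ⟨?_, ?_, ?_, ?_, ?_⟩
        · rintro ⟨c'', hc'', hu''⟩
          rcases List.mem_cons.mp hc'' with h | h
          · rw [h] at hu''; exact absurd hu'' hcu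
          · intro x
            rw [hfold, ihs.1 ⟨c'', h, hu''⟩ x]
            constructor
            · rintro ⟨c3, h3, h4, h5⟩; exact ⟨c3, List.mem_cons_of_mem _ h3, h4, h5⟩
            · rintro ⟨c3, h3, h4, h5⟩
              rcases List.mem_cons.mp h3 with hh | hh
              · rw [hh] at h4; exact absurd h4 hcu
              · exact ⟨c3, hh, h4, h5⟩
        · intro hne
          rw [hfold, ihs.2.1 (fun ⟨c', hc', h1⟩ => hne ⟨c', List.mem_cons_of_mem _ hc', h1⟩)]
        · intro _ x
          rw [hfold, ihs.2.2.2.1 hnecs]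
          constructor
          · intro hx; exact ⟨c, List.mem_cons_self, hcv, hcu, hx⟩
          · rintro ⟨c'', hc'', h1, h2, h3⟩
            rcases List.mem_cons.mp hc'' with hh | hh
            · rwa [← hh]
            · exact absurd ⟨c'', hh, h1, h2⟩ hnecs
        · intro hne; exact absurd ⟨c, List.mem_cons_self, hcv, hcu⟩ hne
        · rw [hfold, ihs.2.2.2.2]
          have : List.filter (fun c => !(PySem.Set.contains c u) && !(PySem.Set.contains c v)) (c :: cs)
              = List.filter (fun c => !(PySem.Set.contains c u) && !(PySem.Set.contains c v)) cs := by
            have hp : (!(PySem.Set.contains c u) && !(PySem.Set.contains c v)) = false := by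
              rw [hbv]; simp
            rw [List.filter_cons, hp]; simp
          rw [this]
      · have hbv : PySem.Set.contains c v = false := pvContains_false hcv
        have hstep : pvMStep u v acc c = (acc.1, acc.2.1, acc.2.2 ++ [c]) := by
          unfold pvMStep; rw [hbu, hbv]; rfl
        rw [hstep] at ihs
        have hfold : List.foldl (pvMStep u v) acc (c :: cs)
            = List.foldl (pvMStep u v) (acc.1, acc.2.1, acc.2.2 ++ [c]) cs := by
          rw [List.foldl_cons, hstep]
        refine ⟨?_, ?_, ?_, ?_, ?_⟩
        · rintro ⟨c'', hc'', hu''⟩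
          rcases List.mem_cons.mp hc'' with h | h
          · rw [h] at hu''; exact absurd hu'' hcu
          · intro x
            rw [hfold, ihs.1 ⟨c'', h, hu''⟩ x]
            constructor
            · rintro ⟨c3, h3, h4, h5⟩; exact ⟨c3, List.mem_cons_of_mem _ h3, h4, h5⟩
            · rintro ⟨c3, h3, h4, h5⟩
              rcases List.mem_cons.mp h3 with hh | hh
              · rw [hh] at h4; exact absurd h4 hcu
              · exact ⟨c3, hh, h4, h5⟩
        · intro hne
          rw [hfold, ihs.2.1 (fun ⟨c', hc', h1⟩ => hne ⟨c', List.mem_cons_of_mem _ hc', h1⟩)]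
        · rintro ⟨c'', hc'', h1, h2⟩
          rcases List.mem_cons.mp hc'' with h | h
          · rw [h] at h1; exact absurd h1 hcv
          · intro x
            rw [hfold, ihs.2.2.1 ⟨c'', h, h1, h2⟩ x]
            constructor
            · rintro ⟨c3, h3, h4, h5, h6⟩; exact ⟨c3, List.mem_cons_of_mem _ h3, h4, h5, h6⟩
            · rintro ⟨c3, h3, h4, h5, h6⟩
              rcases List.mem_cons.mp h3 with hh | hh
              · rw [hh] at h4; exact absurd h4 hcv
              · exact ⟨c3, hh, h4, h5, h6⟩
        · intro hne
          rw [hfold, ihs.2.2.2.1 (fun ⟨c', hc', h1, h2⟩ => hne ⟨c', List.mem_cons_of_mem _ hc', h1, h2⟩)]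
        · rw [hfold, ihs.2.2.2.2]
          have : List.filter (fun c => !(PySem.Set.contains c u) && !(PySem.Set.contains c v)) (c :: cs)
              = c :: List.filter (fun c => !(PySem.Set.contains c u) && !(PySem.Set.contains c v)) cs := by
            have hp : (!(PySem.Set.contains c u) && !(PySem.Set.contains c v)) = true := by
              rw [hbu, hbv]; rfl
            rw [List.filter_cons, hp]; simp
          rw [this, List.append_assoc]
          rfl

lemma pvAdd_empty (u : String) : PySem.Set.add PySem.Set.empty u = [u] := rfl

lemma pvMergeFold_fst_none (u v : String) (comps : List (PySem.Set String)) (hd : pvDisj comps)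
    (hu : ¬ ∃ c ∈ comps, u ∈ c) : (pvMergeFold u v comps).1 = [u] := by
  rw [pvMergeFold_eq]
  exact (pvMergeFold_spec u v comps _ hd).2.1 hu

lemma pvMergeFold_snd_none (u v : String) (comps : List (PySem.Set String)) (hd : pvDisj comps)
    (hv : ¬ ∃ c ∈ comps, v ∈ c ∧ u ∉ c) : (pvMergeFold u v comps).2.1 = [v] := by
  rw [pvMergeFold_eq]
  exact (pvMergeFold_spec u v comps _ hd).2.2.2.1 hv

lemma pvMergeFold_fst_some (u v : String) (comps : List (PySem.Set String)) (hd : pvDisj comps)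
    (hu : ∃ c ∈ comps, u ∈ c) (x : String) :
    x ∈ (pvMergeFold u v comps).1 ↔ ∃ c ∈ comps, u ∈ c ∧ x ∈ c := by
  rw [pvMergeFold_eq]
  exact (pvMergeFold_spec u v comps _ hd).1 hu x

lemma pvMergeFold_snd_some (u v : String) (comps : List (PySem.Set String)) (hd : pvDisj comps)
    (hv : ∃ c ∈ comps, v ∈ c ∧ u ∉ c) (x : String) :
    x ∈ (pvMergeFold u v comps).2.1 ↔ ∃ c ∈ comps, v ∈ c ∧ u ∉ c ∧ x ∈ c := by
  rw [pvMergeFold_eq]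
  exact (pvMergeFold_spec u v comps _ hd).2.2.1 hv x

lemma pvMergeFold_rest (u v : String) (comps : List (PySem.Set String)) (hd : pvDisj comps) :
    (pvMergeFold u v comps).2.2 =
      comps.filter (fun c => !(PySem.Set.contains c u) && !(PySem.Set.contains c v)) := by
  rw [pvMergeFold_eq]
  exact (pvMergeFold_spec u v comps _ hd).2.2.2.2

lemma pvMergeM_mem (u v : String) (comps : List (PySem.Set String)) (hd : pvDisj comps)
    (x : String) :
    x ∈ PySem.Set.union (pvMergeFold u v comps).1 (pvMergeFold u v comps).2.1 ↔
      pvSameC comps x u ∨ pvSameC comps x v := by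
  rw [PySem.Set.mem_union]
  by_cases hu : ∃ c ∈ comps, u ∈ c
  · by_cases hv : ∃ c ∈ comps, v ∈ c ∧ u ∉ c
    · rw [pvMergeFold_fst_some u v comps hd hu x, pvMergeFold_snd_some u v comps hd hv x]
      constructor
      · rintro (⟨c, hc, h1, h2⟩ | ⟨c, hc, h1, h2, h3⟩)
        · exact Or.inl (Or.inr ⟨c, hc, h2, h1⟩)
        · exact Or.inr (Or.inr ⟨c, hc, h3, h1⟩)
      · rintro ((rfl | ⟨c, hc, h1, h2⟩) | (rfl | ⟨c, hc, h1, h2⟩))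
        · obtain ⟨c, hc, h1⟩ := hu
          exact Or.inl ⟨c, hc, h1, h1⟩
        · exact Or.inl ⟨c, hc, h2, h1⟩
        · obtain ⟨c, hc, h1, h2⟩ := hv
          exact Or.inr ⟨c, hc, h1, h2, h1⟩
        · by_cases huc : u ∈ c
          · exact Or.inl ⟨c, hc, huc, h1⟩
          · exact Or.inr ⟨c, hc, h2, huc, h1⟩
    · rw [pvMergeFold_fst_some u v comps hd hu x, pvMergeFold_snd_none u v comps hd hv,
        List.mem_singleton]
      constructor
      · rintro (⟨c, hc, h1, h2⟩ | rfl)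
        · exact Or.inl (Or.inr ⟨c, hc, h2, h1⟩)
        · exact Or.inr (Or.inl rfl)
      · rintro ((rfl | ⟨c, hc, h1, h2⟩) | (rfl | ⟨c, hc, h1, h2⟩))
        · obtain ⟨c, hc, h1⟩ := hu
          exact Or.inl ⟨c, hc, h1, h1⟩
        · exact Or.inl ⟨c, hc, h2, h1⟩
        · exact Or.inr rfl
        · by_cases huc : u ∈ c
          · exact Or.inl ⟨c, hc, huc, h1⟩
          · exact absurd ⟨c, hc, h2, huc⟩ hv
  · by_cases hv : ∃ c ∈ comps, v ∈ c ∧ u ∉ c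
    · rw [pvMergeFold_fst_none u v comps hd hu, pvMergeFold_snd_some u v comps hd hv x,
        List.mem_singleton]
      constructor
      · rintro (rfl | ⟨c, hc, h1, h2, h3⟩)
        · exact Or.inl (Or.inl rfl)
        · exact Or.inr (Or.inr ⟨c, hc, h3, h1⟩)
      · rintro ((rfl | ⟨c, hc, h1, h2⟩) | (rfl | ⟨c, hc, h1, h2⟩))
        · exact Or.inl rfl
        · exact absurd ⟨c, hc, h2⟩ hu
        · obtain ⟨c, hc, h1, h2⟩ := hv
          exact Or.inr ⟨c, hc, h1, h2, h1⟩
        · have huc : u ∉ c := fun hx => hu ⟨c, hc, hx⟩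
          exact Or.inr ⟨c, hc, h2, huc, h1⟩
    · rw [pvMergeFold_fst_none u v comps hd hu, pvMergeFold_snd_none u v comps hd hv,
        List.mem_singleton, List.mem_singleton]
      constructor
      · rintro (rfl | rfl)
        · exact Or.inl (Or.inl rfl)
        · exact Or.inr (Or.inl rfl)
      · rintro ((rfl | ⟨c, hc, h1, h2⟩) | (rfl | ⟨c, hc, h1, h2⟩))
        · exact Or.inl rfl
        · exact absurd ⟨c, hc, h2⟩ hu
        · exact Or.inr rfl
        · have huc : u ∉ c := fun hx => hu ⟨c, hc, hx⟩
          exact absurd ⟨c, hc, h2, huc⟩ hv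

lemma pvMergeRest_mem (u v : String) (comps : List (PySem.Set String)) (hd : pvDisj comps)
    (c : PySem.Set String) :
    c ∈ (pvMergeFold u v comps).2.2 ↔ c ∈ comps ∧ u ∉ c ∧ v ∉ c := by
  rw [pvMergeFold_rest u v comps hd, List.mem_filter]
  constructor
  · rintro ⟨h1, h2⟩
    rw [Bool.and_eq_true, Bool.not_eq_true', Bool.not_eq_true'] at h2
    refine ⟨h1, ?_, ?_⟩
    · intro hx
      rw [pvContains_true hx] at h2
      exact absurd h2.1 (by decide)
    · intro hx
      rw [pvContains_true hx] at h2
      exact absurd h2.2 (by decide)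
  · rintro ⟨h1, h2, h3⟩
    refine ⟨h1, ?_⟩
    rw [Bool.and_eq_true, Bool.not_eq_true', Bool.not_eq_true']
    exact ⟨pvContains_false h2, pvContains_false h3⟩

lemma pvSameC_merge (u v : String) (comps : List (PySem.Set String)) (hd : pvDisj comps)
    (x y : String) :
    pvSameC ((pvMergeFold u v comps).2.2 ++
        [PySem.Set.union (pvMergeFold u v comps).1 (pvMergeFold u v comps).2.1]) x y ↔
      pvSameC comps x y ∨ (pvSameC comps x u ∧ pvSameC comps v y) ∨
        (pvSameC comps x v ∧ pvSameC comps u y) := by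
  constructor
  · rintro (rfl | ⟨c, hc, hx, hy⟩)
    · exact Or.inl (Or.inl rfl)
    · rcases List.mem_append.mp hc with h | h
      · rw [pvMergeRest_mem u v comps hd c] at h
        exact Or.inl (Or.inr ⟨c, h.1, hx, hy⟩)
      · rw [List.mem_singleton] at h
        subst h
        rw [pvMergeM_mem u v comps hd x] at hx
        rw [pvMergeM_mem u v comps hd y] at hy
        rcases hx with hx | hx <;> rcases hy with hy | hy
        · exact Or.inl (pvSameC_trans hd hx (pvSameC_symm hy))
        · exact Or.inr (Or.inl ⟨hx, pvSameC_symm hy⟩)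
        · exact Or.inr (Or.inr ⟨hx, pvSameC_symm hy⟩)
        · exact Or.inl (pvSameC_trans hd hx (pvSameC_symm hy))
  · have hxM : ∀ z, pvSameC comps z u ∨ pvSameC comps z v →
        z ∈ PySem.Set.union (pvMergeFold u v comps).1 (pvMergeFold u v comps).2.1 :=
      fun z hz => (pvMergeM_mem u v comps hd z).mpr hz
    have hMlast : PySem.Set.union (pvMergeFold u v comps).1 (pvMergeFold u v comps).2.1 ∈
        (pvMergeFold u v comps).2.2 ++
          [PySem.Set.union (pvMergeFold u v comps).1 (pvMergeFold u v comps).2.1] :=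
      List.mem_append.mpr (Or.inr (List.mem_singleton.mpr rfl))
    rintro ((rfl | ⟨c, hc, hx, hy⟩) | ⟨h1, h2⟩ | ⟨h1, h2⟩)
    · exact Or.inl rfl
    · by_cases huvc : u ∈ c ∨ v ∈ c
      · refine Or.inr ⟨_, hMlast, hxM x ?_, hxM y ?_⟩
        · rcases huvc with h | h
          · exact Or.inl (Or.inr ⟨c, hc, hx, h⟩)
          · exact Or.inr (Or.inr ⟨c, hc, hx, h⟩)
        · rcases huvc with h | h
          · exact Or.inl (Or.inr ⟨c, hc, hy, h⟩)
          · exact Or.inr (Or.inr ⟨c, hc, hy, h⟩)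
      · have h1 : u ∉ c := fun h => huvc (Or.inl h)
        have h2 : v ∉ c := fun h => huvc (Or.inr h)
        refine Or.inr ⟨c, List.mem_append.mpr (Or.inl ?_), hx, hy⟩
        exact (pvMergeRest_mem u v comps hd c).mpr ⟨hc, h1, h2⟩
    · exact Or.inr ⟨_, hMlast, hxM x (Or.inl h1), hxM y (Or.inr (pvSameC_symm h2))⟩
    · exact Or.inr ⟨_, hMlast, hxM x (Or.inr h1), hxM y (Or.inl (pvSameC_symm h2))⟩

lemma pvDisj_merge (u v : String) (comps : List (PySem.Set String)) (hd : pvDisj comps) :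
    pvDisj ((pvMergeFold u v comps).2.2 ++
      [PySem.Set.union (pvMergeFold u v comps).1 (pvMergeFold u v comps).2.1]) := by
  rw [pvDisj, List.pairwise_append]
  refine ⟨?_, ?_, ?_⟩
  · have hsub : List.Sublist (pvMergeFold u v comps).2.2 comps := by
      rw [pvMergeFold_rest u v comps hd]
      exact List.filter_sublist
    exact List.Pairwise.sublist hsub hd
  · simp
  · intro c hc M hM x hxc
    rw [List.mem_singleton] at hM
    subst hM
    rw [pvMergeRest_mem u v comps hd c] at hc
    intro hxM
    rw [pvMergeM_mem u v comps hd x] at hxM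
    rcases hxM with (rfl | ⟨c', hc', h1, h2⟩) | (rfl | ⟨c', hc', h1, h2⟩)
    · exact hc.2.1 hxc
    · have := pvDisj_unique hd hc' hc.1 h1 hxc
      subst this
      exact hc.2.1 h2
    · exact hc.2.2 hxc
    · have := pvDisj_unique hd hc' hc.1 h1 hxc
      subst this
      exact hc.2.2 h2

lemma pvInv_step (g : PySem.Dict String (PySem.Set String)) (comps : List (PySem.Set String))
    (u v : String) (h : pvInv g comps) :
    pvInv (pvGraphAdd (pvGraphAdd g u v) v u)
      ((pvMergeFold u v comps).2.2 ++
        [PySem.Set.union (pvMergeFold u v comps).1 (pvMergeFold u v comps).2.1]) := by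
  obtain ⟨hd, hiff⟩ := h
  refine ⟨pvDisj_merge u v comps hd, ?_⟩
  intro x y
  rw [pvSameC_merge u v comps hd x y]
  have hA := pvAdj_after_add g u v
  constructor
  · intro hs
    have : pvSameC comps x y ∨
        (Relation.ReflTransGen (pvAdj g) x u ∧ Relation.ReflTransGen (pvAdj g) v y) ∨
        (Relation.ReflTransGen (pvAdj g) x v ∧ Relation.ReflTransGen (pvAdj g) u y) := by
      rcases hs with h1 | ⟨h1, h2⟩ | ⟨h1, h2⟩
      · exact Or.inl h1
      · exact Or.inr (Or.inl ⟨(hiff x u).mp h1, (hiff v y).mp h2⟩)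
      · exact Or.inr (Or.inr ⟨(hiff x v).mp h1, (hiff u y).mp h2⟩)
    have h2 : Relation.ReflTransGen
        (fun a b => pvAdj g a b ∨ (a = u ∧ b = v) ∨ (a = v ∧ b = u)) x y := by
      apply (pvRtg_union_pair (pvAdj g) u v x y).mpr
      rcases this with h1 | h1 | h1
      · exact Or.inl ((hiff x y).mp h1)
      · exact Or.inr (Or.inl h1)
      · exact Or.inr (Or.inr h1)
    exact pvRtg_congr (fun a b => (hA a b).symm) h2
  · intro hr
    have h2 := pvRtg_congr hA hr
    rcases (pvRtg_union_pair (pvAdj g) u v x y).mp h2 with h1 | ⟨h1, h3⟩ | ⟨h1, h3⟩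
    · exact Or.inl ((hiff x y).mpr h1)
    · exact Or.inr (Or.inl ⟨(hiff x u).mpr h1, (hiff v y).mpr h3⟩)
    · exact Or.inr (Or.inr ⟨(hiff x v).mpr h1, (hiff u y).mpr h3⟩)

lemma pvMem_add {s : PySem.Set String} {x y : String} :
    y ∈ PySem.Set.add s x ↔ y ∈ s ∨ y = x := by rw [PySem.Set.mem_add]

lemma pvBfsInner_spec (ns : List String) :
    ∀ (vis : PySem.Set String) (Q : List String),
    (∀ x ∈ vis, x ∈ (pvBfsInner vis Q ns).1) ∧
    (∀ x ∈ (pvBfsInner vis Q ns).1, x ∈ vis ∨ x ∈ ns) ∧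
    (∀ x ∈ ns, x ∈ (pvBfsInner vis Q ns).1) ∧
    (∀ x ∈ (pvBfsInner vis Q ns).2, x ∈ Q ∨ x ∈ ns) ∧
    (∀ x ∈ Q, x ∈ (pvBfsInner vis Q ns).2) ∧
    (∀ x ∈ ns, x ∉ vis → x ∈ (pvBfsInner vis Q ns).2) := by
  induction ns with
  | nil =>
    intro vis Q
    refine ⟨?_, ?_, ?_, ?_, ?_, ?_⟩ <;> simp [pvBfsInner]
  | cons v ns ih =>
    intro vis Q
    rw [pvBfsInner]
    by_cases hv : v ∈ vis
    · rw [pvContains_true hv]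
      simp only [if_true]
      obtain ⟨i1, i2, i3, i4, i5, i6⟩ := ih vis Q
      refine ⟨i1, ?_, ?_, ?_, i5, ?_⟩
      · intro x hx
        rcases i2 x hx with h | h
        · exact Or.inl h
        · exact Or.inr (List.mem_cons_of_mem _ h)
      · intro x hx
        rcases List.mem_cons.mp hx with h | h
        · rw [h]; exact i1 v hv
        · exact i3 x h
      · intro x hx
        rcases i4 x hx with h | h
        · exact Or.inl h
        · exact Or.inr (List.mem_cons_of_mem _ h)
      · intro x hx hnx
        rcases List.mem_cons.mp hx with h | h
        · rw [h] at hnx; exact absurd hv hnx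
        · exact i6 x h hnx
    · rw [pvContains_false hv]
      simp only [Bool.false_eq_true, if_false]
      obtain ⟨i1, i2, i3, i4, i5, i6⟩ := ih (PySem.Set.add vis v) (Q ++ [v])
      refine ⟨?_, ?_, ?_, ?_, ?_, ?_⟩
      · intro x hx
        exact i1 x (pvMem_add.mpr (Or.inl hx))
      · intro x hx
        rcases i2 x hx with h | h
        · rcases pvMem_add.mp h with h' | h'
          · exact Or.inl h'
          · exact Or.inr (List.mem_cons.mpr (Or.inl h'))
        · exact Or.inr (List.mem_cons_of_mem _ h)
      · intro x hx
        rcases List.mem_cons.mp hx with h | h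
        · rw [h]; exact i1 v (pvMem_add.mpr (Or.inr rfl))
        · exact i3 x h
      · intro x hx
        rcases i4 x hx with h | h
        · rcases List.mem_append.mp h with h' | h'
          · exact Or.inl h'
          · rw [List.mem_singleton] at h'
            exact Or.inr (List.mem_cons.mpr (Or.inl h'))
        · exact Or.inr (List.mem_cons_of_mem _ h)
      · intro x hx
        exact i5 x (List.mem_append.mpr (Or.inl hx))
      · intro x hx hnx
        rcases List.mem_cons.mp hx with h | h
        · rw [h]
          exact i5 v (List.mem_append.mpr (Or.inr (List.mem_singleton.mpr rfl)))
        · by_cases hxv : x = v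
          · rw [hxv]
            exact i5 v (List.mem_append.mpr (Or.inr (List.mem_singleton.mpr rfl)))
          · have : x ∉ PySem.Set.add vis v := by
              intro hm
              rcases pvMem_add.mp hm with h' | h'
              · exact hnx h'
              · exact hxv h'
            exact i6 x h this

lemma pvBfsLoop_iff (g : PySem.Dict String (PySem.Set String)) (target s : String) :
    ∀ (N : Nat) (Q : List String) (visited : PySem.Set String),
      pvUnvis g visited + Q.length ≤ N →
      (∀ x ∈ Q, x ∈ visited) →
      (∀ x ∈ visited, Relation.ReflTransGen (pvAdj g) s x) →
      (∀ x ∈ visited, x ∉ Q → x ≠ target ∧ ∀ y, pvAdj g x y → y ∈ visited) →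
      s ∈ visited →
      (pvBfsLoop g target Q visited = true ↔ Relation.ReflTransGen (pvAdj g) s target) := by
  intro N
  induction N using Nat.strong_induction_on with
  | _ N ih =>
    intro Q visited hN h1 h2 h3 hs
    cases Q with
    | nil =>
      rw [pvBfsLoop]
      apply iff_of_false
      · simp
      · intro hr
        have hvc : ∀ x, Relation.ReflTransGen (pvAdj g) s x → x ∈ visited := by
          intro x hx
          induction hx with
          | refl => exact hs
          | tail _ hstep ihx => exact (h3 _ ihx (List.not_mem_nil)).2 _ hstep
        exact (h3 target (hvc target hr) (List.not_mem_nil)).1 rfl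
    | cons u Qt =>
      rw [pvBfsLoop]
      have hu : u ∈ visited := h1 u List.mem_cons_self
      by_cases ht : u = target
      · have hbt : (u == target) = true := beq_iff_eq.mpr ht
        rw [hbt]
        apply iff_of_true
        · simp
        · exact ht ▸ h2 u hu
      · have hbt : (u == target) = false := by
          rw [beq_eq_false_iff_ne]; exact ht
        rw [hbt]
        simp only [Bool.false_eq_true, if_false]
        obtain ⟨i1, i2, i3, i4, i5, i6⟩ :=
          pvBfsInner_spec (g.getD u PySem.Set.empty) visited Qt
        have hmeas := pvBfsInner_measure g (g.getD u PySem.Set.empty) visited Qt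
          (fun x hx => pvMem_verts g u x hx)
        have hNlt : pvUnvis g (pvBfsInner visited Qt (g.getD u PySem.Set.empty)).1 +
            (pvBfsInner visited Qt (g.getD u PySem.Set.empty)).2.length < N := by
          simp only [List.length_cons] at hN
          omega
        apply ih _ hNlt _ _ (le_refl _)
        · intro x hx
          rcases i4 x hx with h | h
          · exact i1 x (h1 x (List.mem_cons_of_mem _ h))
          · exact i3 x h
        · intro x hx
          rcases i2 x hx with h | h
          · exact h2 x h
          · exact (h2 u hu).tail h
        · intro x hx hq
          rcases i2 x hx with hxv | hxn
          · by_cases hxu : x = u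
            · subst hxu
              refine ⟨ht, ?_⟩
              intro y hy
              exact i3 y hy
            · have hxqt : x ∉ Qt := fun h => hq (i5 x h)
              have hnm : x ∉ u :: Qt := by
                intro hm
                rcases List.mem_cons.mp hm with h | h
                · exact hxu h
                · exact hxqt h
              obtain ⟨hne, hcl⟩ := h3 x hxv hnm
              exact ⟨hne, fun y hy => i1 y (hcl y hy)⟩
          · by_cases hxv : x ∈ visited
            · by_cases hxu : x = u
              · subst hxu
                refine ⟨ht, ?_⟩
                intro y hy
                exact i3 y hy
              · have hxqt : x ∉ Qt := fun h => hq (i5 x h)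
                have hnm : x ∉ u :: Qt := by
                  intro hm
                  rcases List.mem_cons.mp hm with h | h
                  · exact hxu h
                  · exact hxqt h
                obtain ⟨hne, hcl⟩ := h3 x hxv hnm
                exact ⟨hne, fun y hy => i1 y (hcl y hy)⟩
            · exact absurd (i6 x hxn hxv) hq
        · exact i1 s hs

lemma pvBfs_iff (g : PySem.Dict String (PySem.Set String)) (u t : String) :
    pvBfs g u t = true ↔ Relation.ReflTransGen (pvAdj g) u t := by
  unfold pvBfs
  apply pvBfsLoop_iff g t u (pvUnvis g (PySem.Set.add PySem.Set.empty u) + 1)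
    [u] (PySem.Set.add PySem.Set.empty u) (by simp)
  · intro x hx
    rw [List.mem_singleton] at hx
    rw [hx, pvAdd_empty]
    exact List.mem_singleton.mpr rfl
  · intro x hx
    rw [pvAdd_empty, List.mem_singleton] at hx
    rw [hx]
  · intro x hx hnx
    rw [pvAdd_empty] at hx
    exact absurd hx hnx
  · rw [pvAdd_empty]
    exact List.mem_singleton.mpr rfl

lemma pvSame_iff (comps : List (PySem.Set String)) (a b : String) :
    pvSame comps a b = true ↔ pvSameC comps a b := by
  unfold pvSame pvSameC
  rw [Bool.or_eq_true, beq_iff_eq, List.any_eq_true]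
  constructor
  · rintro (h | ⟨c, hc, h⟩)
    · exact Or.inl h
    · rw [Bool.and_eq_true] at h
      exact Or.inr ⟨c, hc, pvMem_of_contains h.1, pvMem_of_contains h.2⟩
  · rintro (h | ⟨c, hc, h1, h2⟩)
    · exact Or.inl h
    · refine Or.inr ⟨c, hc, ?_⟩
      rw [Bool.and_eq_true]
      exact ⟨pvContains_true h1, pvContains_true h2⟩

lemma pvCheckLoop_eq (g : PySem.Dict String (PySem.Set String))
    (comps : List (PySem.Set String)) (hinv : pvInv g comps) :
    ∀ check, pvCheckLoop g check = !(check.any (fun p => pvSame comps p.1 p.2)) := by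
  intro check
  induction check with
  | nil => rfl
  | cons p rest ihc =>
    obtain ⟨u, v⟩ := p
    rw [pvCheckLoop]
    have hb : pvBfs g u v = pvSame comps u v := by
      have h1 := pvBfs_iff g u v
      have h2 := pvSame_iff comps u v
      have h3 := hinv.2 u v
      cases hA : pvBfs g u v <;> cases hB : pvSame comps u v
      · rfl
      · rw [hA] at h1
        rw [hB] at h2
        exact absurd (h1.mpr (h3.mp (h2.mp rfl))) (by simp)
      · rw [hA] at h1
        rw [hB] at h2
        exact absurd (h2.mpr (h3.mpr (h1.mp rfl))) (by simp)
      · rfl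
    rw [List.any_cons, hb]
    cases pvSame comps u v
    · simp only [Bool.false_eq_true, if_false, Bool.false_or]
      exact ihc
    · simp

lemma pvStep_pair (eq : String) (g : PySem.Dict String (PySem.Set String))
    (comps : List (PySem.Set String)) (cA : List (String × String)) (h : pvInv g comps) :
    (pvStepA (g, cA) eq).2 = (pvStepB (comps, cA) eq).2 ∧
      pvInv (pvStepA (g, cA) eq).1 (pvStepB (comps, cA) eq).1 := by
  unfold pvStepA pvStepB
  cases hsl : (PySem.Str.slice eq (some 1) (some 3) == "!=")
  · simp only [Bool.false_eq_true, if_false]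
    cases hsp : PySem.Str.split? eq "==" with
    | none => exact ⟨rfl, h⟩
    | some l =>
      match l with
      | [] => exact ⟨rfl, h⟩
      | [a] => exact ⟨rfl, h⟩
      | [u, v] => exact ⟨rfl, pvInv_step g comps u v h⟩
      | a :: b :: c :: rest => exact ⟨rfl, h⟩
  · simp only [if_true]
    cases hsp : PySem.Str.split? eq "!=" with
    | none => exact ⟨rfl, h⟩
    | some l =>
      match l with
      | [] => exact ⟨rfl, h⟩
      | [a] => exact ⟨rfl, h⟩
      | [u, v] => exact ⟨rfl, h⟩
      | a :: b :: c :: rest => exact ⟨rfl, h⟩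

lemma pvFold_inv :
    ∀ (eqs : List String) (g : PySem.Dict String (PySem.Set String))
      (comps : List (PySem.Set String)) (cA : List (String × String)), pvInv g comps →
    (List.foldl pvStepA (g, cA) eqs).2 = (List.foldl pvStepB (comps, cA) eqs).2 ∧
      pvInv (List.foldl pvStepA (g, cA) eqs).1 (List.foldl pvStepB (comps, cA) eqs).1 := by
  intro eqs
  induction eqs with
  | nil => intro g comps cA h; exact ⟨rfl, h⟩
  | cons eq rest ihr =>
    intro g comps cA h
    simp only [List.foldl_cons]
    obtain ⟨hpair, hinv⟩ := pvStep_pair eq g comps cA h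
    have hA : pvStepA (g, cA) eq = ((pvStepA (g, cA) eq).1, (pvStepA (g, cA) eq).2) :=
      (Prod.mk.eta).symm
    have hB : pvStepB (comps, cA) eq = ((pvStepB (comps, cA) eq).1, (pvStepB (comps, cA) eq).2) :=
      (Prod.mk.eta).symm
    rw [hA, hB, hpair]
    exact ihr _ _ _ hinv

lemma pvInv_init : pvInv PySem.Dict.empty [] := by
  constructor
  · exact List.Pairwise.nil
  · intro x y
    have hne : ∀ a b : String, ¬ pvAdj PySem.Dict.empty a b := by
      intro a b hab
      unfold pvAdj at hab
      rw [PySem.Dict.getD_empty] at hab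
      simp [PySem.Set.empty] at hab
    rw [pvRtg_empty hne x y]
    unfold pvSameC
    simp

-- ===== VERDICT (by name: the statement is the Claim_ definition above) =====
theorem equationsPossibleUsingBFS_spec : Claim_equal_equationsPossibleUsingBFS := by
  unfold Claim_equal_equationsPossibleUsingBFS
  intro equations _ _
  unfold Spec_equationsPossibleUsingBFS
  obtain ⟨hpair, hinv⟩ := pvFold_inv equations PySem.Dict.empty [] [] pvInv_init
  have hA : equationsPossibleUsingBFS equations =
      pvCheckLoop (List.foldl pvStepA (PySem.Dict.empty, []) equations).1
        (List.foldl pvStepA (PySem.Dict.empty, []) equations).2 := rfl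
  have hB : equationsPossibleUsingBFS_alt equations =
      !((List.foldl pvStepB ([], []) equations).2.any
        (fun p => pvSame (List.foldl pvStepB ([], []) equations).1 p.1 p.2)) := rfl
  rw [hA, hB, pvCheckLoop_eq _ _ hinv, hpair]
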